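-- pv_equiv track=rewrite | github.com/glenwinters/gvobot | utils.py | sciencify
-- ===== SOURCE A (Python) =====
-- import string
--
-- def sciencify(text):
--     """Science that text!
--
--     - Uppercase every letter
--     - Add a period after every letter
--     - Remove periods in the message if they follow a scienced letter
--     """
--     scienced_text = ''
--     text_lowercase = text.lower()
--     for i, c in enumerate(text_lowercase):
--         if c in string.ascii_lowercase:
--             scienced_text += c.upper() + '.'
--         elif c == '.':
--             # Don't keep the period if the previous character was a letter
--             if i == 0 or text_lowercase[i - 1] not in string.ascii_lowercase:
--                 scienced_text += c
--         else:
--             scienced_text += c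
--     return scienced_text
-- ===== SOURCE B (Python) =====
-- import re
--
-- def sciencify(text):
--     t = text.lower()
--     # pass 1: drop every period that immediately follows an ascii letter
--     t = re.sub(r'(?<=[a-z])\.', '', t)
--     # pass 2: uppercase each ascii letter and append a period
--     return re.sub(r'[a-z]', lambda m: m.group().upper() + '.', t)
-- ===== Notes on version B (the rewrite author's own statement) =====
-- stated objective: idiomatic
-- what changed: Replaces the stateful single-pass character loop (with enumerate and a previous-index lookup) by two global regex substitutions on the lowered text: a lookbehind pass that deletes periods following a letter, then a pass that uppercases each letter and appends a period.
import Mathlib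
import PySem

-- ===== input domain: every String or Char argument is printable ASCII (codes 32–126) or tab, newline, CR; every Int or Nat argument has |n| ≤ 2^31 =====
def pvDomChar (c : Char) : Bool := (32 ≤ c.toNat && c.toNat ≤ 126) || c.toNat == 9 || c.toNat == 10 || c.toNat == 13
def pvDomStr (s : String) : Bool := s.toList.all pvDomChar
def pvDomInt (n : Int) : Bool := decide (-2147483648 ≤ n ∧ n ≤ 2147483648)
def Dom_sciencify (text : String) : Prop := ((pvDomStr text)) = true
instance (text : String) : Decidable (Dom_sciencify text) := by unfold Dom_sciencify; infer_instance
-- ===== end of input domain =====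

-- B replaces A's stateful single-pass loop by two global passes (drop post-letter
-- periods, then uppercase-and-dot each letter) — objective: idiomatic; same cost.

-- ===== PORT A =====
-- `c in string.ascii_lowercase` (shared char-class test of both versions)
def pvIsAsciiLower (c : Char) : Bool := decide ('a' ≤ c) && decide (c ≤ 'z')

def sciencify (text : String) : String :=
  String.ofList ((PySem.List.enumerate (PySem.Str.lower text).toList 0).foldl
    (fun acc (ic : Int × Char) =>
      if pvIsAsciiLower ic.2 then acc ++ [PySem.Chars.upperChar ic.2, '.']
      else if ic.2 = '.' then
        -- `i == 0 or text_lowercase[i-1] not in string.ascii_lowercase`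
        if decide (ic.1 = 0) ||
            !(pvIsAsciiLower (PySem.List.pyGetD (PySem.Str.lower text).toList (ic.1 - 1) ' '))
        then acc ++ [ic.2] else acc
      else acc ++ [ic.2]) ([] : List Char))

-- ===== PORT B =====
-- pass 1: re.sub(r'(?<=[a-z])\.', '', t) — drop each '.' whose predecessor in t is a letter
def sciPass1 (prev : Option Char) : List Char → List Char
  | [] => []
  | c :: rest =>
    if c = '.' && (match prev with | some p => pvIsAsciiLower p | none => false)
    then sciPass1 (some c) rest
    else c :: sciPass1 (some c) rest

-- pass 2: re.sub(r'[a-z]', λ m, m.upper() + '.', t)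
def sciPass2 (l : List Char) : List Char :=
  l.flatMap (fun c => if pvIsAsciiLower c then [PySem.Chars.upperChar c, '.'] else [c])

def sciencify_alt (text : String) : String :=
  String.ofList (sciPass2 (sciPass1 none (PySem.Str.lower text).toList))

-- ===== PRECONDITION & SPEC =====
def Spec_sciencify (text : String) (out : String) : Prop := out = sciencify_alt text
instance (text : String) (out : String) : Decidable (Spec_sciencify text out) := by unfold Spec_sciencify; infer_instance

-- ===== CLAIM (what is proved, stated in full; the proofs are below) =====
def Claim_equal_sciencify : Prop := ∀ (text : String), Dom_sciencify text → Spec_sciencify text (sciencify text)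

-- ===== LEMMAS AND PROOFS =====

-- previous-character view of the char at position k-1 of tl
def sciPrevAt (tl : List Char) (k : Nat) : Option Char :=
  if k = 0 then none else tl[k-1]?

def sciPrevLower (prev : Option Char) : Bool :=
  match prev with | some p => pvIsAsciiLower p | none => false

-- one-pass recursion with explicit previous character (common shape of both ports)
def sciGo (prev : Option Char) : List Char → List Char
  | [] => []
  | c :: rest =>
    (if pvIsAsciiLower c then [PySem.Chars.upperChar c, '.']
     else if c = '.' then (if sciPrevLower prev then [] else ['.'])
     else [c]) ++ sciGo (some c) rest

lemma sciGo_eq_passes (prev : Option Char) (l : List Char) :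
    sciGo prev l = sciPass2 (sciPass1 prev l) := by
  induction l generalizing prev with
  | nil => simp [sciGo, sciPass1, sciPass2]
  | cons c rest ih =>
    by_cases hdot : c = '.'
    · subst hdot
      have hlow : pvIsAsciiLower '.' = false := by decide
      by_cases hp : sciPrevLower prev = true
      · simp [sciGo, sciPass1, sciPrevLower, hlow, ih]
        cases prev with
        | none => simp [sciPrevLower] at hp
        | some p => simp_all [sciPrevLower, sciPass2]
      · have hp' : sciPrevLower prev = false := by simpa using hp
        cases prev with
        | none =>
          simp [sciGo, sciPass1, sciPrevLower, hlow, ih, sciPass2]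
        | some p =>
          have : pvIsAsciiLower p = false := by simpa [sciPrevLower] using hp'
          simp [sciGo, sciPass1, sciPrevLower, hlow, this, ih, sciPass2]
    · simp [sciGo, sciPass1, hdot, ih, sciPass2]

-- the condition A tests at index k equals the prev-char view
lemma sciCond_eq (tl : List Char) (k : Nat) (hk : k < tl.length) :
    (decide ((k : Int) = 0) || !(pvIsAsciiLower (PySem.List.pyGetD tl ((k : Int) - 1) ' ')))
      = !(sciPrevLower (sciPrevAt tl k)) := by
  cases k with
  | zero => simp [sciPrevAt, sciPrevLower]
  | succ n =>
    have hn : n < tl.length := by omega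
    have h1 : ((n + 1 : Nat) : Int) - 1 = ((n : Nat) : Int) := by push_cast; ring
    rw [h1, PySem.List.pyGetD_natCast]
    simp [sciPrevAt, sciPrevLower, List.getD, List.getElem?_eq_getElem hn]
    intro h; exfalso; omega

-- A's fold over the enumerated suffix equals acc ++ sciGo
lemma sciFold_eq (tl : List Char) (s : List Char) (k : Nat) (acc : List Char)
    (hs : tl.drop k = s) :
    (PySem.List.enumerate s (k : Int)).foldl (fun acc (ic : Int × Char) =>
      if pvIsAsciiLower ic.2 then acc ++ [PySem.Chars.upperChar ic.2, '.']
      else if ic.2 = '.' then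
        if decide (ic.1 = 0) || !(pvIsAsciiLower (PySem.List.pyGetD tl (ic.1 - 1) ' '))
        then acc ++ [ic.2] else acc
      else acc ++ [ic.2]) acc
    = acc ++ sciGo (sciPrevAt tl k) s := by
  induction s generalizing k acc with
  | nil => simp [sciGo]
  | cons c rest ih =>
    have hk : k < tl.length := by
      by_contra h
      rw [List.drop_eq_nil_of_le (by omega)] at hs
      exact List.cons_ne_nil _ _ hs.symm
    rw [List.drop_eq_getElem_cons hk] at hs
    obtain ⟨hc, hrest⟩ := List.cons.inj hs
    have hck : tl[k]? = some c := by
      rw [List.getElem?_eq_getElem hk, hc]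
    have hprev : sciPrevAt tl (k+1) = some c := by
      simp [sciPrevAt, hck]
    rw [PySem.List.enumerate_cons]
    simp only [List.foldl_cons]
    have hkk : ((k : Int) + 1) = ((k + 1 : Nat) : Int) := by push_cast; ring
    by_cases hlow : pvIsAsciiLower c = true
    · have hdot : ¬ (c = '.') := by
        intro h; subst h; simp [pvIsAsciiLower] at hlow
      rw [if_pos hlow, hkk, ih (k+1) _ hrest, hprev]
      simp [sciGo, hlow]
    · have hlow' : pvIsAsciiLower c = false := by simpa using hlow
      by_cases hdot : c = '.'
      · subst hdot
        rw [if_neg (by simp [hlow']), if_pos rfl, sciCond_eq tl k hk]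
        by_cases hp : sciPrevLower (sciPrevAt tl k) = true
        · rw [hp]
          simp only [Bool.not_true, if_neg (by decide : ¬ (false = true))]
          rw [hkk, ih (k+1) _ hrest, hprev]
          simp [sciGo, hlow', hp]
        · have hp' : sciPrevLower (sciPrevAt tl k) = false := by simpa using hp
          rw [hp']
          simp only [Bool.not_false, if_true]
          rw [hkk, ih (k+1) _ hrest, hprev]
          simp [sciGo, hlow', hp']
      · rw [if_neg (by simp [hlow']), if_neg hdot, hkk, ih (k+1) _ hrest, hprev]
        simp [sciGo, hlow', hdot]

-- ===== VERDICT (by name: the statement is the Claim_ definition above) =====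
theorem sciencify_spec : Claim_equal_sciencify := by
  intro text _
  unfold Spec_sciencify sciencify sciencify_alt
  have h := sciFold_eq ((PySem.Str.lower text).toList) ((PySem.Str.lower text).toList) 0 [] (by simp)
  simp only [Nat.cast_zero] at h
  rw [h]
  simp [sciPrevAt, sciGo_eq_passes]
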